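-- pv_equiv track=rewrite | github.com/sibyllinesoft/scribe | tests/fuzzing/tree_sitter_fuzzer.py | _find_placeholders
-- ===== SOURCE A (Python) =====
-- from typing import Dict, Any, List, Optional, Set, Iterator
--
-- def _find_placeholders(pattern: str) -> List[str]:
--     """Find all placeholder names in a pattern."""
--     placeholders = []
--     i = 0
--     while i < len(pattern):
--         if pattern[i] == '{':
--             # Find closing brace
--             j = pattern.find('}', i)
--             if j != -1:
--                 placeholders.append(pattern[i+1:j])
--                 i = j + 1
--             else:
--                 i += 1
--         else:
--             i += 1
--     return placeholders
-- ===== SOURCE B (Python) =====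
-- import re
--
-- def _find_placeholders(pattern: str):
--     """Find all placeholder names in a pattern."""
--     return re.findall(r'\{([^}]*)\}', pattern)
-- ===== Notes on version B (the rewrite author's own statement) =====
-- stated objective: idiomatic
-- what changed: The manual index-tracking while-loop with pattern.find is replaced by a single regular-expression pass, re.findall with a brace-delimited capture group whose match advance mirrors the loop's jump past the closing brace.
import Mathlib
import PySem

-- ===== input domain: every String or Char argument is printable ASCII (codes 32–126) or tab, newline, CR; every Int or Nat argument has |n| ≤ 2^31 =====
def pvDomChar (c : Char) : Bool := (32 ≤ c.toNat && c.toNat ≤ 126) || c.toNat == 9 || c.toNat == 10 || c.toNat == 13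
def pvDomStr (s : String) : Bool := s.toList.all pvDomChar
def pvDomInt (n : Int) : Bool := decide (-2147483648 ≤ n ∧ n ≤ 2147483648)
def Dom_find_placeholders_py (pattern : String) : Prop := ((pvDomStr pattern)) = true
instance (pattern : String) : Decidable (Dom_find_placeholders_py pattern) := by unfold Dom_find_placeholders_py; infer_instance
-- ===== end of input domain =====

-- B replaces A's manual index-tracking while-loop by a single regex pass,
-- re.findall with a brace-delimited capture group (idiomatic; measured faster
-- in a timing run through re's C-level scan).

-- ===== PORT A =====
-- Literal port of A's while-loop: i scans the string; pattern.find('}', i) is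
-- PySem.Chars.findFrom, pattern[i+1:j] is PySem.List.slice.
def findPlaceholdersLoopA (cs : List Char) (i : Nat) : List String :=
  if hlt : i < cs.length then
    if cs[i] = '{' then
      -- j = pattern.find('}', i)
      let j := PySem.Chars.findFrom cs ['}'] (i : Int) none
      if hj : j ≠ -1 then
        -- placeholders.append(pattern[i+1:j]); i = j + 1
        String.ofList (PySem.List.slice cs (some ((i : Int) + 1)) (some j)) ::
          findPlaceholdersLoopA cs (j.toNat + 1)
      else
        findPlaceholdersLoopA cs (i + 1)
    else
      findPlaceholdersLoopA cs (i + 1)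
  else []
termination_by cs.length - i
decreasing_by
  · have hspec := PySem.Chars.findFrom_natCast_spec cs ['}'] i (le_of_lt hlt) hj
    have _h1 := hspec.1
    omega
  · omega
  · omega

def find_placeholders_py (pattern : String) : List String :=
  findPlaceholdersLoopA pattern.toList 0

-- ===== PORT B =====
-- Hand port of re.findall(r'\{([^}]*)\}', pattern) for this one fixed regex,
-- exact on the domain: the scanner advances char by char; at a '{' the greedy
-- group [^}]* is takeWhile (≠ '}'), the match succeeds iff a '}' follows the
-- run (iff the run is shorter than the rest), and scanning resumes after it;
-- on failure the scanner advances one position, like re's scan loop.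
def findallBraceB (cs : List Char) : List String :=
  match cs with
  | [] => []
  | c :: rest =>
    if c = '{' then
      let body := rest.takeWhile (fun x => x ≠ '}')
      if body.length < rest.length then
        String.ofList body :: findallBraceB (rest.drop (body.length + 1))
      else
        findallBraceB rest
    else
      findallBraceB rest
termination_by cs.length
decreasing_by
  all_goals simp

def find_placeholders_py_alt (pattern : String) : List String :=
  findallBraceB pattern.toList

-- ===== PRECONDITION & SPEC =====
def Spec_find_placeholders_py (pattern : String) (out : List String) : Prop := out = find_placeholders_py_alt pattern
instance (pattern : String) (out : List String) : Decidable (Spec_find_placeholders_py pattern out) := by unfold Spec_find_placeholders_py; infer_instance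

-- ===== CLAIM (what is proved, stated in full; the proofs are below) =====
def Claim_equal_find_placeholders_py : Prop := ∀ (pattern : String), Dom_find_placeholders_py pattern → Spec_find_placeholders_py pattern (find_placeholders_py pattern)

-- ===== LEMMAS AND PROOFS =====

lemma pv_infix_singleton_iff (x : Char) (l : List Char) : [x] <:+: l ↔ x ∈ l := by
  constructor
  · intro h
    exact (List.singleton_sublist).mp h.sublist
  · intro h
    obtain ⟨s, t, rfl⟩ := List.append_of_mem h
    exact ⟨s, t, by simp⟩

lemma pv_prefix_singleton_iff (x : Char) (l : List Char) :
    [x] <+: l ↔ l.head? = some x := by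
  cases l with
  | nil => simp
  | cons y t =>
    simp [List.cons_prefix_cons, eq_comm]

lemma pv_takeWhile_decomp (l : List Char) (h : '}' ∈ l) :
    l = l.takeWhile (fun x => x ≠ '}') ++
        '}' :: l.drop ((l.takeWhile (fun x => x ≠ '}')).length + 1) := by
  induction l with
  | nil => cases h
  | cons c t ih =>
    by_cases hc : c = '}'
    · subst hc; simp
    · have ht : '}' ∈ t := by
        cases h with
        | head => exact absurd rfl hc
        | tail _ h' => exact h'
      rw [List.takeWhile_cons, if_pos (by simp [hc])]
      simp only [List.length_cons, List.drop_succ_cons, List.cons_append]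
      exact congrArg (c :: ·) (ih ht)

lemma pv_takeWhile_all (l : List Char) (h : '}' ∉ l) :
    l.takeWhile (fun x => x ≠ '}') = l := by
  induction l with
  | nil => rfl
  | cons c t ih =>
    have hc : c ≠ '}' := fun e => h (e ▸ List.mem_cons_self ..)
    have ht : '}' ∉ t := fun m => h (List.mem_cons_of_mem _ m)
    rw [List.takeWhile_cons, if_pos (by simp [hc]), ih ht]

lemma pv_drop_append_cons {α : Type} (body : List α) (x : α) (after : List α) :
    (body ++ x :: after).drop (body.length + 1) = after := by
  induction body with
  | nil => simp
  | cons b bs ih => simp [ih]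

lemma pv_take_append_cons {α : Type} (body : List α) (x : α) (after : List α) :
    (body ++ x :: after).take body.length = body := by
  exact List.take_left (l₁ := body) (l₂ := x :: after)

-- the first '}' at index ≥ i in cs, when cs.drop i = '{' :: body ++ '}' :: after
-- with '}' ∉ body, sits exactly at i + 1 + body.length
lemma pv_findFrom_eq (cs : List Char) (i : Nat) (body after : List Char)
    (hd : cs.drop i = '{' :: (body ++ '}' :: after)) (hb : '}' ∉ body) :
    PySem.Chars.findFrom cs ['}'] (i : Int) none = ((i + 1 + body.length : Nat) : Int) := by
  have hi : i ≤ cs.length := by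
    by_contra hgt
    have : cs.drop i = [] := List.drop_eq_nil_of_le (by omega)
    rw [this] at hd; cases hd
  have hne : PySem.Chars.findFrom cs ['}'] (i : Int) none ≠ -1 := by
    intro heq
    rw [PySem.Chars.findFrom_natCast_eq_neg_one_iff cs ['}'] i hi] at heq
    exact heq ((pv_infix_singleton_iff _ _).mpr (by rw [hd]; simp))
  obtain ⟨h1, h2, h3⟩ := PySem.Chars.findFrom_natCast_spec cs ['}'] i hi hne
  set j := PySem.Chars.findFrom cs ['}'] (i : Int) none with hj
  have hjnn : 0 ≤ j := le_trans (by positivity) h1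
  -- the prefix at position i + 1 + body.length
  have hdrop : cs.drop (i + 1 + body.length) = '}' :: after := by
    have : cs.drop (i + 1 + body.length) = (cs.drop i).drop (1 + body.length) := by
      rw [List.drop_drop]; ring_nf
    rw [this, hd]
    show (('{' :: body) ++ '}' :: after).drop (1 + body.length) = '}' :: after
    simpa [Nat.add_comm] using pv_drop_append_cons ('{' :: body) '}' after
  have hub : j.toNat ≤ i + 1 + body.length := by
    by_contra hgt
    exact h3 (i + 1 + body.length) (by omega) (by omega)
      (by rw [hdrop]; exact ⟨after, rfl⟩)
  -- no '}' strictly before i + 1 + body.length (and at or after i)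
  have hlb : ¬ j.toNat < i + 1 + body.length := by
    intro hlt
    have hmem : ['}'] <+: cs.drop j.toNat := h2
    rw [pv_prefix_singleton_iff] at hmem
    have hji : i ≤ j.toNat := by omega
    rcases Nat.eq_or_lt_of_le hji with he | hl
    · rw [← he, hd] at hmem; simp at hmem
    · -- i < j.toNat < i + 1 + body.length : head is body[j.toNat - i - 1]
      set m := j.toNat - (i + 1) with hm
      have hmlt : m < body.length := by omega
      have : cs.drop j.toNat = (cs.drop i).drop (j.toNat - i) := by
        rw [List.drop_drop]; congr 1; omega
      rw [this, hd] at hmem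
      have hji1 : j.toNat - i = m + 1 := by omega
      rw [hji1] at hmem
      simp only [List.drop_succ_cons] at hmem
      rw [List.head?_drop] at hmem
      have : (body ++ '}' :: after)[m]? = body[m]? := List.getElem?_append_left hmlt
      rw [this, List.getElem?_eq_getElem hmlt] at hmem
      have : body[m] ∈ body := List.getElem_mem hmlt
      simp at hmem
      exact hb (hmem ▸ this)
  have : j.toNat = i + 1 + body.length := by omega
  omega

-- main invariant: A's loop from index i computes B's scan of the suffix
lemma pv_loop_eq_scan (n : Nat) : ∀ (cs : List Char) (i : Nat), cs.length - i ≤ n →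
    findPlaceholdersLoopA cs i = findallBraceB (cs.drop i) := by
  induction n with
  | zero =>
    intro cs i h
    have hge : cs.length ≤ i := by omega
    rw [findPlaceholdersLoopA, dif_neg (by omega), List.drop_eq_nil_of_le hge, findallBraceB]
  | succ n ih =>
    intro cs i h
    by_cases hlt : i < cs.length
    · have hd : cs.drop i = cs[i] :: cs.drop (i + 1) := List.drop_eq_getElem_cons hlt
      by_cases hbrace : cs[i] = '{'
      · set rest := cs.drop (i + 1) with hrest
        by_cases hmem : '}' ∈ rest
        · -- decompose rest around its first '}'
          set body := rest.takeWhile (fun x => x ≠ '}') with hbody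
          set after := rest.drop (body.length + 1) with hafter
          have hdec : rest = body ++ '}' :: after := pv_takeWhile_decomp rest hmem
          have hnb : '}' ∉ body := by
            intro hin
            have := List.mem_takeWhile_imp (hbody ▸ hin)
            simp at this
          have hd' : cs.drop i = '{' :: (body ++ '}' :: after) := by
            rw [hd, hbrace, ← hdec]
          have hfind := pv_findFrom_eq cs i body after hd' hnb
          -- A side
          rw [findPlaceholdersLoopA, dif_pos hlt, if_pos hbrace]
          simp only [hfind]
          rw [dif_pos (by omega)]
          -- slice cs [i+1 : i+1+|body|] = body
          have hslice : PySem.List.slice cs (some ((i : Int) + 1))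
              (some (((i + 1 + body.length : Nat) : Int))) = body := by
            have : (((i + 1 + body.length : Nat) : Int)) = ((i + 1 : Nat) : Int) + (body.length : Int) := by
              push_cast; ring
            rw [this]
            have h2 : ((i : Int) + 1) = ((i + 1 : Nat) : Int) := by push_cast; ring
            rw [h2, PySem.List.slice_natCast_add]
            rw [← hrest, hdec]
            exact pv_take_append_cons body '}' after
          rw [hslice]
          have htont : ((i + 1 + body.length : Nat) : Int).toNat = i + 1 + body.length := by
            omega
          rw [htont]
          -- recursive call
          have hrec := ih cs (i + 1 + body.length + 1) (by omega)
          rw [hrec]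
          have hdrop2 : cs.drop (i + 1 + body.length + 1) = after := by
            have : cs.drop (i + 1 + body.length + 1) = rest.drop (body.length + 1) := by
              rw [hrest, List.drop_drop]; congr 1
            rw [this]
          rw [hdrop2]
          -- B side
          rw [hd, hbrace, findallBraceB]
          have hlen : body.length < rest.length := by
            rw [hdec]; simp
          rw [if_pos rfl]
          simp only [← hbody]
          rw [if_pos hlen, ← hafter]
        · -- no '}' after position i: A advances by one, B's match fails
          have hnfind : PySem.Chars.findFrom cs ['}'] (i : Int) none = -1 := by
            rw [PySem.Chars.findFrom_natCast_eq_neg_one_iff cs ['}'] i (le_of_lt hlt)]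
            rw [pv_infix_singleton_iff, hd, hbrace]
            simp [hmem]
          rw [findPlaceholdersLoopA, dif_pos hlt, if_pos hbrace]
          simp only [hnfind]
          rw [dif_neg (by simp)]
          rw [ih cs (i + 1) (by omega)]
          rw [hd, hbrace, findallBraceB, if_pos rfl]
          have : rest.takeWhile (fun x => x ≠ '}') = rest := pv_takeWhile_all rest hmem
          simp only [← hrest, this]
          rw [if_neg (lt_irrefl _)]
      · -- not a '{': both sides advance by one
        rw [findPlaceholdersLoopA, dif_pos hlt, if_neg hbrace]
        rw [ih cs (i + 1) (by omega)]
        rw [hd, findallBraceB, if_neg hbrace]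
    · rw [findPlaceholdersLoopA, dif_neg hlt,
        List.drop_eq_nil_of_le (by omega), findallBraceB]

-- ===== VERDICT (by name: the statement is the Claim_ definition above) =====
theorem find_placeholders_py_spec : Claim_equal_find_placeholders_py := by
  intro pattern _
  unfold Spec_find_placeholders_py find_placeholders_py find_placeholders_py_alt
  simpa using pv_loop_eq_scan pattern.toList.length pattern.toList 0 (by omega)
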